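-- pv_equiv track=rewrite | github.com/DannyZednickova/daniela_zednickova_portfolio | Python_projects/cipher ADFGV/adfgvx.py | cipher_list
-- ===== SOURCE A (Python) =====
-- def cipher_list(ciphered_text, key):
--     """Return the letters that pass first
--     encryption stages in the ADVFX matrix. It already returns it in
--     letters that depend on lenght of a key.
--     :param ciphered_text, key:
--     :return:
--     """
--     len_key = len(key)
--     ciphered_text = ' '.join(
--         ciphered_text[i:i + len_key] for i in range(0, len(ciphered_text), len_key))
--     cipher_in_list = []
--     help = []
--     i = 0
--     for char in ciphered_text:
--         if char == " ":
--             cipher_in_list.append(help)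
--             help = []
--             i = 0
--             continue
--         help.append(char)
--         i += 1
--     cipher_in_list.append(help)
--     cipher_in_list = [ele for ele in cipher_in_list if ele != []]
--     count_of_lists = len(cipher_in_list)
--     check_last_item = len(cipher_in_list[count_of_lists - 1])
--
--     for i in range(0, len_key):
--         if check_last_item < len_key:
--             cipher_in_list[count_of_lists - 1].append(" ")
--             check_last_item += 1
--         else:
--             continue
--     return cipher_in_list
-- ===== SOURCE B (Python) =====
-- def cipher_list(ciphered_text, key):
--     """Single pass over ciphered_text: close the current group at each
--     key-length boundary and at each space (spaces are dropped), then keep the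
--     non-empty groups and pad the last one with spaces up to the key length."""
--     len_key = len(key)
--     groups = []
--     cur = []
--     for idx, char in enumerate(ciphered_text):
--         if idx > 0 and idx % len_key == 0:
--             groups.append(cur)
--             cur = []
--         if char == " ":
--             groups.append(cur)
--             cur = []
--         else:
--             cur.append(char)
--     groups.append(cur)
--     groups = [g for g in groups if g]
--     groups[-1].extend(" " * (len_key - len(groups[-1])))
--     return groups
-- ===== Notes on version B (the rewrite author's own statement) =====
-- stated objective: simpler
-- what changed: Replaces A's two-pass join-then-reparse design (build a space-separated string of key-length slices, then re-scan it splitting on spaces) by a single enumerate pass that closes the current group at each key-length boundary and at each space, then filters empty groups and pads the last one directly with a computed run of spaces instead of A's counting loop.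
import Mathlib
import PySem

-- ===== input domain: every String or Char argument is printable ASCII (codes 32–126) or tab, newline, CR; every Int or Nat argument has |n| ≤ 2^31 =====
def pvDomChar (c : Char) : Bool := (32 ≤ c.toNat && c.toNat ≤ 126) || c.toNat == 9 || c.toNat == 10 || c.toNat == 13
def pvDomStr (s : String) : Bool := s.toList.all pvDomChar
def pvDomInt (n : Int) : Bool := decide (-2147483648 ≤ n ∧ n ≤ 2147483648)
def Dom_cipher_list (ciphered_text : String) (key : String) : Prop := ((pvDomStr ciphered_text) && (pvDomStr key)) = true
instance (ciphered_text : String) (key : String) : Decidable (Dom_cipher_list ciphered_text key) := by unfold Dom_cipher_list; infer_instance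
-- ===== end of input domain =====

-- B replaces A's join-then-reparse two-pass chunking by a single enumerate pass (simpler); equal return value proved on Pre_.

-- ===== PORT A =====
-- A's inner loop body (char == " " closes the current group; else append char, bump dead counter i)
def stepA (s : List (List String) × List String × Int) (c : Char) : List (List String) × List String × Int :=
  if c = ' ' then (s.1 ++ [s.2.1], [], 0) else (s.1, s.2.1 ++ [String.singleton c], s.2.2 + 1)

-- A's padding loop body (if check_last_item < len_key: append " " and bump, else continue)
def padStepA (len_key : Int) (s : List String × Int) (_ : Int) : List String × Int :=
  if s.2 < len_key then (s.1 ++ [" "], s.2 + 1) else s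

def cipher_list (ciphered_text : String) (key : String) : List (List String) :=
  let len_key := PySem.Str.len key
  let t := ciphered_text.toList
  -- ciphered_text = ' '.join(ciphered_text[i:i+len_key] for i in range(0, len(ciphered_text), len_key))
  let joined := PySem.Chars.join [' ']
    ((PySem.List.pyRange 0 (PySem.Str.len ciphered_text) len_key).map
      (fun i => PySem.Chars.slice t (some i) (some (i + len_key))))
  let st := joined.foldl stepA ([], [], 0)
  let cil := (st.1 ++ [st.2.1]).filter (fun e => decide (e ≠ []))
  -- cipher_in_list[count_of_lists - 1]: Python raises IndexError when no group is left; Pre_ excludes that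
  match PySem.List.pyGet? cil ((cil.length : Int) - 1) with
  | none => []
  | some last =>
    let p := (PySem.List.pyRange 0 len_key 1).foldl (padStepA len_key) (last, (last.length : Int))
    cil.dropLast ++ [p.1]

-- ===== PORT B =====
-- B's loop body: close the current group at a key-length boundary, then handle the char (space closes, else append)
def stepB (len_key : Int) (s : List (List String) × List String) (p : Int × Char) :
    List (List String) × List String :=
  let s := if 0 < p.1 ∧ PySem.Int.mod p.1 len_key = 0 then (s.1 ++ [s.2], ([] : List String)) else s
  if p.2 = ' ' then (s.1 ++ [s.2], []) else (s.1, s.2 ++ [String.singleton p.2])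

def cipher_list_alt (ciphered_text : String) (key : String) : List (List String) :=
  let len_key := PySem.Str.len key
  let st := (PySem.List.enumerate ciphered_text.toList 0).foldl (stepB len_key) ([], [])
  let groups := (st.1 ++ [st.2]).filter (fun g => decide (g ≠ []))
  -- groups[-1]: Python raises IndexError on an empty list; Pre_ excludes that
  match groups.getLast? with
  | none => []
  | some last => groups.dropLast ++ [last ++ List.replicate ((len_key - (last.length : Int))).toNat " "]

-- ===== PRECONDITION & SPEC =====
-- Pre_ excludes exactly the inputs where A raises: empty key (ValueError from range step 0)
-- and text without any non-space character (IndexError: no group survives the filter).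
def Pre_cipher_list (ciphered_text : String) (key : String) : Prop :=
  key ≠ "" ∧ ciphered_text.toList.any (fun c => c ≠ ' ') = true
instance (ciphered_text : String) (key : String) : Decidable (Pre_cipher_list ciphered_text key) := by
  unfold Pre_cipher_list; infer_instance

def pvWitness_cipher_list : String × String := ("DGAXDFAV", "ab")

def Spec_cipher_list (ciphered_text : String) (key : String) (out : List (List String)) : Prop := out = cipher_list_alt ciphered_text key
instance (ciphered_text : String) (key : String) (out : List (List String)) : Decidable (Spec_cipher_list ciphered_text key out) := by unfold Spec_cipher_list; infer_instance

-- ===== CLAIM (what is proved, stated in full; the proofs are below) =====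
def Claim_equal_cipher_list : Prop := ∀ (ciphered_text : String) (key : String), Dom_cipher_list ciphered_text key → Pre_cipher_list ciphered_text key → Spec_cipher_list ciphered_text key (cipher_list ciphered_text key)

-- ===== LEMMAS AND PROOFS =====

-- The common space-splitting step, with no counter and no boundary test
def nbStep (s : List (List String) × List String) (c : Char) : List (List String) × List String :=
  if c = ' ' then (s.1 ++ [s.2], []) else (s.1, s.2 ++ [String.singleton c])

-- Run nbStep over a chunk: (closed groups, open group)
def runNB : List String → List Char → List (List String) × List String
  | cur, [] => ([], cur)
  | cur, c :: cs =>
    if c = ' ' then ((cur :: (runNB [] cs).1), (runNB [] cs).2)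
    else runNB (cur ++ [String.singleton c]) cs

-- Run a nonempty chunk list: chunks are separated by a group break
def runCh : List (List Char) → List (List String) × List String
  | [] => ([], [])
  | [C] => runNB [] C
  | C :: D :: rest =>
    ((runNB [] C).1 ++ (runNB [] C).2 :: (runCh (D :: rest)).1, (runCh (D :: rest)).2)

theorem foldA_proj (cs : List Char) : ∀ (acc : List (List String)) (help : List String) (i : Int),
    ((cs.foldl stepA (acc, help, i)).1, (cs.foldl stepA (acc, help, i)).2.1)
      = cs.foldl nbStep (acc, help) := by
  induction cs with
  | nil => intro acc help i; rfl
  | cons c cs ih =>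
    intro acc help i
    simp only [List.foldl_cons, stepA, nbStep]
    by_cases hc : c = ' ' <;> simp [hc, ih]

theorem foldNB_runNB (cs : List Char) : ∀ (acc : List (List String)) (cur : List String),
    cs.foldl nbStep (acc, cur) = (acc ++ (runNB cur cs).1, (runNB cur cs).2) := by
  induction cs with
  | nil => intro acc cur; simp [runNB]
  | cons c cs ih =>
    intro acc cur
    simp only [List.foldl_cons, nbStep, runNB]
    by_cases hc : c = ' ' <;> simp [hc, ih]

theorem runNB_append (xs : List Char) : ∀ (ys : List Char) (cur : List String),
    runNB cur (xs ++ ys)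
      = ((runNB cur xs).1 ++ (runNB (runNB cur xs).2 ys).1, (runNB (runNB cur xs).2 ys).2) := by
  induction xs with
  | nil => intro ys cur; simp [runNB]
  | cons c cs ih =>
    intro ys cur
    simp only [List.cons_append, runNB]
    by_cases hc : c = ' ' <;> simp [hc, ih]

theorem runNB_join (rest : List (List Char)) : ∀ (C : List Char),
    runNB [] (PySem.Chars.join [' '] (C :: rest)) = runCh (C :: rest) := by
  induction rest with
  | nil =>
    intro C
    rw [PySem.Chars.join_singleton]
    rfl
  | cons D rest' ih =>
    intro C
    rw [PySem.Chars.join_cons_cons]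
    rw [List.append_assoc, List.singleton_append, runNB_append]
    simp [runNB, ih D, runCh]

theorem stepB_off (lk : Int) (st : List (List String) × List String) (p : Int × Char)
    (h : ¬(0 < p.1 ∧ PySem.Int.mod p.1 lk = 0)) : stepB lk st p = nbStep st p.2 := by
  simp [stepB, nbStep, h]

theorem stepB_on (lk : Int) (st : List (List String) × List String) (p : Int × Char)
    (h : 0 < p.1 ∧ PySem.Int.mod p.1 lk = 0) : stepB lk st p = nbStep (st.1 ++ [st.2], []) p.2 := by
  simp [stepB, nbStep, h]

theorem foldB_noBound (lk : Int) (C : List Char) : ∀ (s0 : Int)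
    (acc : List (List String)) (cur : List String),
    (∀ p ∈ PySem.List.enumerate C s0, ¬(0 < p.1 ∧ PySem.Int.mod p.1 lk = 0)) →
    (PySem.List.enumerate C s0).foldl (stepB lk) (acc, cur) = C.foldl nbStep (acc, cur) := by
  induction C with
  | nil => intro s0 acc cur h; rfl
  | cons c cs ih =>
    intro s0 acc cur h
    rw [PySem.List.enumerate_cons, List.foldl_cons, List.foldl_cons,
      stepB_off lk (acc, cur) (s0, c) (h (s0, c) (by rw [PySem.List.enumerate_cons]; exact List.mem_cons_self))]
    exact ih (s0 + 1) _ _ (fun p hp => h p (by rw [PySem.List.enumerate_cons]; exact List.mem_cons_of_mem _ hp))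

theorem foldB_chunk_one (k : Nat) (hk : 1 ≤ k) (C : List Char) (hC : C ≠ []) (hCk : C.length ≤ k)
    (m : Nat) (hm : 1 ≤ m) (acc : List (List String)) (cur : List String) :
    (PySem.List.enumerate C ((m * k : Nat) : Int)).foldl (stepB (k : Int)) (acc, cur)
      = (acc ++ cur :: (runNB [] C).1, (runNB [] C).2) := by
  obtain ⟨c0, C', rfl⟩ := List.exists_cons_of_ne_nil hC
  rw [PySem.List.enumerate_cons, List.foldl_cons,
    stepB_on (k : Int) (acc, cur) (((m * k : Nat) : Int), c0)
      ⟨by show (0 : Int) < ((m * k : Nat) : Int); exact_mod_cast Nat.mul_pos hm hk, by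
        rw [PySem.Int.mod_natCast, Nat.mul_mod_left]; rfl⟩]
  rw [foldB_noBound (k : Int) C' (((m * k : Nat) : Int) + 1) _ _ (by
    intro p hp
    rcases (PySem.List.mem_enumerate_iff C' _ p).mp hp with ⟨j, hj, rfl⟩
    intro ⟨_, hmod⟩
    have hcast : ((m * k : Nat) : Int) + 1 + (j : Int) = ((m * k + (1 + j) : Nat) : Int) := by
      push_cast; ring
    rw [hcast, PySem.Int.mod_natCast, Nat.mul_add_mod'] at hmod
    have hjk : 1 + j < k := by
      have := hCk; simp at this; omega
    rw [Nat.mod_eq_of_lt hjk] at hmod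
    exact absurd (by exact_mod_cast hmod) (by omega))]
  have : nbStep (acc ++ [cur], []) c0 = List.foldl nbStep (acc ++ [cur], []) [c0] := by rfl
  rw [this, ← List.foldl_append, List.singleton_append, foldNB_runNB]
  simp

theorem foldB_chunks (k : Nat) (hk : 1 ≤ k) (rest : List (List Char)) :
    ∀ (C : List Char) (m : Nat), 1 ≤ m →
    (∀ D ∈ C :: rest, D ≠ [] ∧ D.length ≤ k) →
    (∀ D ∈ (C :: rest).dropLast, D.length = k) →
    ∀ (acc : List (List String)) (cur : List String),
    (PySem.List.enumerate (C :: rest).flatten ((m * k : Nat) : Int)).foldl (stepB (k : Int)) (acc, cur)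
      = (acc ++ cur :: (runCh (C :: rest)).1, (runCh (C :: rest)).2) := by
  induction rest with
  | nil =>
    intro C m hm h1 h2 acc cur
    have hC := h1 C List.mem_cons_self
    simp only [List.flatten_cons, List.flatten_nil, List.append_nil]
    rw [foldB_chunk_one k hk C hC.1 hC.2 m hm acc cur]
    rfl
  | cons D rest' ih =>
    intro C m hm h1 h2 acc cur
    have hC := h1 C List.mem_cons_self
    have hClen : C.length = k := h2 C (by simp [List.dropLast_cons₂])
    rw [List.flatten_cons, PySem.List.enumerate_append, List.foldl_append,
      foldB_chunk_one k hk C hC.1 hC.2 m hm acc cur]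
    have hst : ((m * k : Nat) : Int) + ((C.length : Nat) : Int) = (((m + 1) * k : Nat) : Int) := by
      rw [hClen]; push_cast; ring
    rw [hst, ih D (m + 1) (by omega) (fun E hE => h1 E (List.mem_cons_of_mem _ hE))
      (fun E hE => h2 E (by simp [List.dropLast_cons₂]; right; exact (by simpa using hE)))]
    show _ = (acc ++ cur :: (runCh (C :: D :: rest')).1, (runCh (C :: D :: rest')).2)
    simp [runCh]

theorem foldB_top (k : Nat) (hk : 1 ≤ k) (C : List Char) (rest : List (List Char))
    (h1 : ∀ D ∈ C :: rest, D ≠ [] ∧ D.length ≤ k)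
    (h2 : ∀ D ∈ (C :: rest).dropLast, D.length = k) :
    (PySem.List.enumerate (C :: rest).flatten 0).foldl (stepB (k : Int)) ([], [])
      = runCh (C :: rest) := by
  have hC := h1 C List.mem_cons_self
  rw [List.flatten_cons, PySem.List.enumerate_append, List.foldl_append]
  rw [foldB_noBound (k : Int) C 0 _ _ (by
    intro p hp
    rcases (PySem.List.mem_enumerate_iff C _ p).mp hp with ⟨j, hj, rfl⟩
    intro ⟨hpos, hmod⟩
    have hj0 : 1 ≤ j := by
      by_contra h0
      have hj00 : j = 0 := by omega
      subst hj00
      simp at hpos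
    have hjk : j < k := lt_of_lt_of_le hj hC.2
    have hcast : ((0 : Int) + (j : Int)) = ((j : Nat) : Int) := by ring
    rw [hcast, PySem.Int.mod_natCast, Nat.mod_eq_of_lt hjk] at hmod
    exact absurd (by exact_mod_cast hmod) (by omega))]
  rw [foldNB_runNB, List.nil_append]
  match rest with
  | [] =>
    show List.foldl _ _ (PySem.List.enumerate [].flatten _) = _
    simp only [List.flatten_nil, PySem.List.enumerate_nil, List.foldl_nil]
    rfl
  | D :: rest' =>
    have hClen : C.length = k := h2 C (by simp [List.dropLast_cons₂])
    have hst : ((0 : Int) + ((C.length : Nat) : Int)) = ((1 * k : Nat) : Int) := by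
      rw [hClen, Nat.one_mul]; ring
    rw [hst, foldB_chunks k hk rest' D 1 (le_refl 1)
      (fun E hE => h1 E (List.mem_cons_of_mem _ hE))
      (fun E hE => h2 E (by simp [List.dropLast_cons₂]; right; exact (by simpa using hE)))]
    simp [runCh]

theorem runNB_len (C : List Char) : ∀ (cur : List String),
    (∀ g ∈ (runNB cur C).1, g.length ≤ cur.length + C.length) ∧
      (runNB cur C).2.length ≤ cur.length + C.length := by
  induction C with
  | nil => intro cur; simp [runNB]
  | cons c cs ih =>
    intro cur
    simp only [runNB]
    by_cases hc : c = ' '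
    · simp only [hc, reduceIte]
      constructor
      · intro g hg
        rcases List.mem_cons.mp hg with h | h
        · subst h; simp
        · have := (ih []).1 g h; simp at this ⊢; omega
      · have := (ih []).2; simp at this ⊢; omega
    · simp only [if_neg hc]
      constructor
      · intro g hg; have := (ih (cur ++ [String.singleton c])).1 g hg; simp at this ⊢; omega
      · have := (ih (cur ++ [String.singleton c])).2; simp at this ⊢; omega

theorem runCh_len (k : Nat) (chunks : List (List Char)) (h : ∀ C ∈ chunks, C.length ≤ k) :
    (∀ g ∈ (runCh chunks).1, g.length ≤ k) ∧ (runCh chunks).2.length ≤ k := by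
  induction chunks with
  | nil => simp [runCh]
  | cons C rest ih =>
    have hC : C.length ≤ k := h C List.mem_cons_self
    have hNB := runNB_len C []
    simp only [List.length_nil, Nat.zero_add] at hNB
    match rest with
    | [] =>
      show (∀ g ∈ (runNB [] C).1, g.length ≤ k) ∧ (runNB [] C).2.length ≤ k
      exact ⟨fun g hg => le_trans (hNB.1 g hg) hC, le_trans hNB.2 hC⟩
    | D :: rest' =>
      have ih' := ih (fun E hE => h E (List.mem_cons_of_mem _ hE))
      constructor
      · intro g hg
        simp only [runCh] at hg
        rcases List.mem_append.mp hg with hg | hg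
        · exact le_trans (hNB.1 g hg) hC
        · rcases List.mem_cons.mp hg with hg | hg
          · subst hg; exact le_trans hNB.2 hC
          · exact ih'.1 g hg
      · exact ih'.2

theorem pad_stay (k : Nat) (l : List Int) : ∀ (s : List String × Int), ¬(s.2 < (k : Int)) →
    l.foldl (padStepA (k : Int)) s = s := by
  induction l with
  | nil => intro s h; rfl
  | cons x l ih =>
    intro s h
    rw [List.foldl_cons]
    have : padStepA (k : Int) s x = s := by simp [padStepA, h]
    rw [this]
    exact ih s h

theorem pad_go (k : Nat) (l : List Int) : ∀ (g : List String) (c : Nat), c ≤ k → k ≤ c + l.length →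
    (l.foldl (padStepA (k : Int)) (g, (c : Int))).1 = g ++ List.replicate (k - c) " " := by
  induction l with
  | nil =>
    intro g c h1 h2
    simp at h2
    have : c = k := by omega
    subst this
    simp
  | cons x l ih =>
    intro g c h1 h2
    by_cases hc : c < k
    · rw [List.foldl_cons]
      have hci : ((c : Int) < (k : Int)) := by exact_mod_cast hc
      have hstep : padStepA (k : Int) (g, (c : Int)) x = (g ++ [" "], ((c + 1 : Nat) : Int)) := by
        simp only [padStepA, if_pos hci]
        push_cast; ring_nf
      rw [hstep, ih (g ++ [" "]) (c + 1) (by omega) (by simp at h2 ⊢; omega)]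
      have hrep : k - c = (k - (c + 1)) + 1 := by omega
      rw [hrep, List.replicate_succ, List.append_assoc]
      rfl
    · have hni : ¬(((g, (c : Int)) : List String × Int).2 < (k : Int)) := by
        simp only []
        exact fun h => hc (by exact_mod_cast h)
      rw [pad_stay k (x :: l) (g, (c : Int)) hni]
      have : k - c = 0 := by omega
      simp [this]

theorem flatten_chunks (t : List Char) (k : Nat) : ∀ (q : Nat),
    ((List.range q).map (fun j => (t.drop (k * j)).take k)).flatten = t.take (k * q) := by
  intro q
  induction q with
  | zero => simp
  | succ q ih =>
    rw [List.range_succ, List.map_append, List.flatten_append, ih]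
    simp only [List.map_cons, List.map_nil, List.flatten_cons, List.flatten_nil, List.append_nil]
    rw [Nat.mul_succ, List.take_add]

theorem chunksA_eq (t : List Char) (k : Nat) (hk : 1 ≤ k) :
    (PySem.List.pyRange 0 (t.length : Int) (k : Int)).map
        (fun i => PySem.Chars.slice t (some i) (some (i + (k : Int))))
      = (List.range ((t.length + k - 1) / k)).map (fun j => (t.drop (k * j)).take k) := by
  have hkz : (0 : Int) < (k : Int) := by exact_mod_cast hk
  rw [PySem.List.pyRange_of_pos _ _ hkz, List.map_map]
  have hcount : (if (0 : Int) < (t.length : Int) then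
      (((t.length : Int) - 0 + (k : Int) - 1) / (k : Int)).toNat else 0) = (t.length + k - 1) / k := by
    by_cases hn : (0 : Int) < (t.length : Int)
    · rw [if_pos hn]
      have h1 : ((t.length : Int) - 0 + (k : Int) - 1) = (((t.length + k - 1 : Nat)) : Int) := by
        have : 1 ≤ t.length + k := by omega
        push_cast [this]
        ring
      rw [h1, ← Int.natCast_div, Int.toNat_natCast]
    · rw [if_neg hn]
      have hn0 : t.length = 0 := by omega
      rw [hn0]
      rw [Nat.div_eq_of_lt (by omega)]
  rw [hcount]
  apply List.map_congr_left
  intro j hj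
  show PySem.Chars.slice t (some (0 + (k : Int) * (j : Int))) (some (0 + (k : Int) * (j : Int) + (k : Int)))
      = (t.drop (k * j)).take k
  have h1 : (0 + (k : Int) * (j : Int)) = ((k * j : Nat) : Int) := by push_cast; ring
  rw [h1]
  have h2 : (((k * j : Nat) : Int) + (k : Int)) = ((k * j + k : Nat) : Int) := by push_cast; ring
  rw [h2]
  show PySem.List.slice t (some ((k * j : Nat) : Int)) (some ((k * j + k : Nat) : Int)) = _
  rw [PySem.List.slice_natCast]
  congr 1
  omega

theorem pyGet_last {α : Type} (xs : List α) (h : xs ≠ []) :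
    PySem.List.pyGet? xs ((xs.length : Int) - 1) = some (xs.getLast h) := by
  have hlen : 1 ≤ xs.length := List.length_pos_iff.mpr h
  have hcast : ((xs.length : Int) - 1) = ((xs.length - 1 : Nat) : Int) := by
    push_cast [hlen]; ring
  rw [hcast, PySem.List.pyGet?_natCast, ← List.getLast?_eq_getElem?, List.getLast?_eq_some_getLast h]

theorem core (t : List Char) (k : Nat) (hk : 1 ≤ k) :
    (let joined := PySem.Chars.join [' ']
        ((PySem.List.pyRange 0 (t.length : Int) (k : Int)).map
          (fun i => PySem.Chars.slice t (some i) (some (i + (k : Int)))));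
     let st := joined.foldl stepA ([], [], 0);
     let cil := (st.1 ++ [st.2.1]).filter (fun e => decide (e ≠ []));
     match PySem.List.pyGet? cil ((cil.length : Int) - 1) with
     | none => []
     | some last =>
       cil.dropLast ++ [((PySem.List.pyRange 0 (k : Int) 1).foldl (padStepA (k : Int)) (last, (last.length : Int))).1])
    = (let st := (PySem.List.enumerate t 0).foldl (stepB (k : Int)) ([], []);
       let groups := (st.1 ++ [st.2]).filter (fun g => decide (g ≠ []));
       match groups.getLast? with
       | none => []
       | some last => groups.dropLast ++ [last ++ List.replicate (((k : Int) - (last.length : Int))).toNat " "]) := by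
  dsimp only
  rw [chunksA_eq t k hk]
  by_cases ht : t = []
  · subst ht
    simp only [List.length_nil, Nat.zero_add, Nat.div_eq_of_lt (by omega : k - 1 < k),
      List.range_zero, List.map_nil, PySem.Chars.join_nil, List.foldl_nil,
      PySem.List.enumerate_nil, List.nil_append]
    simp [PySem.List.pyGet?, PySem.List.pyIdx?]
  · have hn : 1 ≤ t.length := List.length_pos_iff.mpr ht
    have hdm := Nat.div_add_mod (t.length + k - 1) k
    have hmodlt : (t.length + k - 1) % k < k := Nat.mod_lt _ (by omega)
    have hq1 : t.length ≤ k * ((t.length + k - 1) / k) := by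
      generalize k * ((t.length + k - 1) / k) = P at hdm ⊢
      omega
    have hq2 : k * ((t.length + k - 1) / k) ≤ t.length + k - 1 := by
      generalize k * ((t.length + k - 1) / k) = P at hdm ⊢
      omega
    have hqpos : 1 ≤ (t.length + k - 1) / k := by
      rw [Nat.one_le_div_iff (by omega)]; omega
    have hmem : ∀ D ∈ (List.range ((t.length + k - 1) / k)).map
        (fun j => (t.drop (k * j)).take k), D ≠ [] ∧ D.length ≤ k := by
      intro D hD
      rcases List.mem_map.mp hD with ⟨j, hj, rfl⟩
      have hj' : j < (t.length + k - 1) / k := List.mem_range.mp hj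
      have hmul : k * (j + 1) ≤ k * ((t.length + k - 1) / k) :=
        Nat.mul_le_mul_left k (by omega)
      rw [Nat.mul_add, Nat.mul_one] at hmul
      refine ⟨List.ne_nil_of_length_pos ?_, ?_⟩
      · rw [List.length_take, List.length_drop, Nat.lt_min]
        refine ⟨by omega, ?_⟩
        generalize k * j = KJ at hmul ⊢
        generalize k * ((t.length + k - 1) / k) = KQ at hmul hq2
        omega
      · rw [List.length_take]
        exact Nat.min_le_left _ _
    have hdropl : ∀ D ∈ ((List.range ((t.length + k - 1) / k)).map
        (fun j => (t.drop (k * j)).take k)).dropLast, D.length = k := by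
      obtain ⟨q', hq'⟩ : ∃ q', (t.length + k - 1) / k = q' + 1 :=
        ⟨(t.length + k - 1) / k - 1, by omega⟩
      rw [hq', List.range_succ, List.map_append, List.map_singleton, List.dropLast_concat]
      intro D hD
      rcases List.mem_map.mp hD with ⟨j, hj, rfl⟩
      have hj' : j < q' := List.mem_range.mp hj
      have hmul : k * (j + 1) ≤ k * q' := Nat.mul_le_mul_left k (by omega)
      have hqq : k * (q' + 1) = k * q' + k := by rw [Nat.mul_add, Nat.mul_one]
      rw [hq', hqq] at hq2
      rw [Nat.mul_add, Nat.mul_one] at hmul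
      rw [List.length_take, List.length_drop]
      rw [Nat.min_eq_left]
      generalize k * j = KJ at hmul ⊢
      generalize k * q' = KQ at hmul hq2
      omega
    have hflat : ((List.range ((t.length + k - 1) / k)).map
        (fun j => (t.drop (k * j)).take k)).flatten = t := by
      rw [flatten_chunks]
      exact List.take_of_length_le (by omega)
    have hne : (List.range ((t.length + k - 1) / k)).map
        (fun j => (t.drop (k * j)).take k) ≠ [] := by
      apply List.ne_nil_of_length_pos
      rw [List.length_map, List.length_range]
      omega
    obtain ⟨C, rest, hCR⟩ := List.exists_cons_of_ne_nil hne
    rw [hCR] at hmem hdropl hflat ⊢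
    -- A side: the stitched fold result is runCh (C :: rest)
    have h1 := foldA_proj (PySem.Chars.join [' '] (C :: rest)) [] [] 0
    rw [foldNB_runNB, runNB_join rest C, List.nil_append] at h1
    have hA1 : ((PySem.Chars.join [' '] (C :: rest)).foldl stepA ([], [], 0)).1
        = (runCh (C :: rest)).1 := congrArg Prod.fst h1
    have hA2 : ((PySem.Chars.join [' '] (C :: rest)).foldl stepA ([], [], 0)).2.1
        = (runCh (C :: rest)).2 := congrArg Prod.snd h1
    rw [hA1, hA2]
    -- B side
    rw [← hflat, foldB_top k hk C rest hmem hdropl]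
    -- common tail
    by_cases hL : ((runCh (C :: rest)).1 ++ [(runCh (C :: rest)).2]).filter
        (fun e => decide (e ≠ [])) = []
    · rw [hL]
      simp [PySem.List.pyGet?, PySem.List.pyIdx?]
    · rw [pyGet_last _ hL, List.getLast?_eq_some_getLast hL]
      have hlastmem := List.mem_of_mem_filter (List.getLast_mem hL)
      have hcl := runCh_len k (C :: rest) (fun D hD => (hmem D hD).2)
      have hlen : (((runCh (C :: rest)).1 ++ [(runCh (C :: rest)).2]).filter
          (fun e => decide (e ≠ [])) |>.getLast hL).length ≤ k := by
        rcases List.mem_append.mp hlastmem with h | h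
        · exact hcl.1 _ h
        · rw [List.mem_singleton.mp h]; exact hcl.2
      have hpadlen : (PySem.List.pyRange 0 (k : Int) 1).length = k := by
        rw [PySem.List.length_pyRange_one]; omega
      dsimp only
      have hpad := pad_go k (PySem.List.pyRange 0 (k : Int) 1)
        ((List.filter (fun e => decide (e ≠ []))
          ((runCh (C :: rest)).1 ++ [(runCh (C :: rest)).2])).getLast hL)
        ((List.filter (fun e => decide (e ≠ []))
          ((runCh (C :: rest)).1 ++ [(runCh (C :: rest)).2])).getLast hL).length
        hlen (by rw [hpadlen]; omega)
      rw [hpad]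
      have htn : ((k : Int) - ((((runCh (C :: rest)).1 ++ [(runCh (C :: rest)).2]).filter
          (fun e => decide (e ≠ [])) |>.getLast hL).length : Int)).toNat
          = k - (((runCh (C :: rest)).1 ++ [(runCh (C :: rest)).2]).filter
          (fun e => decide (e ≠ [])) |>.getLast hL).length := by omega
      rw [htn]

-- ===== VERDICT (by name: the statement is the Claim_ definition above) =====
theorem cipher_list_spec : Claim_equal_cipher_list := by
  intro ct key _ hpre
  obtain ⟨hkey, -⟩ := hpre
  have hk : 1 ≤ key.toList.length := by
    rcases Nat.eq_zero_or_pos key.toList.length with h | h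
    · exact absurd (String.toList_eq_nil_iff.mp (List.eq_nil_of_length_eq_zero h)) hkey
    · exact h
  show cipher_list ct key = cipher_list_alt ct key
  have h := core ct.toList key.toList.length hk
  unfold cipher_list cipher_list_alt
  simp only [PySem.Str.len_eq]
  exact h
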